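-- pv_equiv track=rewrite | github.com/francisco-liam/Py-Federated-Maze-DQN | maze_env/maze_builder.py | _cells_along_segment
-- ===== SOURCE A (Python) =====
-- from typing import Dict, List, Optional, Set, Tuple
--
-- Pos  = Tuple[int, int]
--
-- def _cells_along_segment(a: Pos, b: Pos) -> List[Pos]:
--     dx = 0 if b[0] == a[0] else (1 if b[0] > a[0] else -1)
--     dy = 0 if b[1] == a[1] else (1 if b[1] > a[1] else -1)
--     cells: List[Pos] = [a]
--     current = a
--     while current != b:
--         current = (current[0] + dx, current[1] + dy)
--         cells.append(current)
--     return cells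
-- ===== SOURCE B (Python) =====
-- from typing import List, Tuple
--
-- Pos = Tuple[int, int]
--
-- def _cells_along_segment(a: Pos, b: Pos) -> List[Pos]:
--     dx = 0 if b[0] == a[0] else (1 if b[0] > a[0] else -1)
--     dy = 0 if b[1] == a[1] else (1 if b[1] > a[1] else -1)
--     n = max(abs(b[0] - a[0]), abs(b[1] - a[1]))
--     return [(a[0] + i * dx, a[1] + i * dy) for i in range(n + 1)]
-- ===== Notes on version B (the rewrite author's own statement) =====
-- stated objective: simpler
-- what changed: Replaces the while-loop that mutates a 'current' cell until it equals b with a closed-form indexed construction: cell i is a + i*(dx,dy) for i in range(n+1) where n = max(|dx|,|dy|) of the deltas; Pre_ excludes segments that are neither axis-aligned nor 45-degree diagonal, on which A loops forever (never returns).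
import Mathlib
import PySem

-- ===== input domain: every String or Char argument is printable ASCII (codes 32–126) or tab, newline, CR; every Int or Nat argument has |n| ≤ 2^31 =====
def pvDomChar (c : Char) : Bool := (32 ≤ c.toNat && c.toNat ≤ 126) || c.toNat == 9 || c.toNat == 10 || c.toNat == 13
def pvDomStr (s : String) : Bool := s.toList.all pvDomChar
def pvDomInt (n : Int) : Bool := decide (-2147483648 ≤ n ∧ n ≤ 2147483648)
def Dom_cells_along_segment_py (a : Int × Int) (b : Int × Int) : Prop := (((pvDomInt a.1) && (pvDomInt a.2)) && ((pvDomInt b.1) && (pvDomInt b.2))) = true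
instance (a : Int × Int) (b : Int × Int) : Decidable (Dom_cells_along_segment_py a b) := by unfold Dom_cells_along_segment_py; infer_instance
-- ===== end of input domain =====

-- B replaces A's mutate-until-equal while-loop with a closed-form indexed list
-- [(a + i*(dx,dy)) for i in range(n+1)]; objective: simpler. Pre_ excludes the
-- segments on which A loops forever (never returns).


-- ===== PORT A =====
-- the while-loop of A, fuel-bounded (inside Pre_ the fuel suffices; outside, A diverges and nothing is claimed)
def pvLoopA (dx dy : Int) (b : Int × Int) : Nat → (Int × Int) → List (Int × Int) → List (Int × Int)
  | fuel, current, cells =>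
    if current = b then cells
    else match fuel with
      | 0 => cells
      | f + 1 =>
        let c' := (current.1 + dx, current.2 + dy)
        pvLoopA dx dy b f c' (cells ++ [c'])

def cells_along_segment_py (a : Int × Int) (b : Int × Int) : List (Int × Int) :=
  let dx : Int := if b.1 = a.1 then 0 else if b.1 > a.1 then 1 else -1
  let dy : Int := if b.2 = a.2 then 0 else if b.2 > a.2 then 1 else -1
  pvLoopA dx dy b (max (b.1 - a.1).natAbs (b.2 - a.2).natAbs) a [a]

-- ===== PORT B =====
def cells_along_segment_py_alt (a : Int × Int) (b : Int × Int) : List (Int × Int) :=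
  let dx : Int := if b.1 = a.1 then 0 else if b.1 > a.1 then 1 else -1
  let dy : Int := if b.2 = a.2 then 0 else if b.2 > a.2 then 1 else -1
  let n : Nat := max (b.1 - a.1).natAbs (b.2 - a.2).natAbs
  (List.range (n + 1)).map (fun (i : Nat) => (a.1 + (i : Int) * dx, a.2 + (i : Int) * dy))

-- ===== PRECONDITION & SPEC =====
-- Pre_ excludes segments that are neither axis-aligned nor 45° diagonal: there A's
-- while-loop never reaches b and loops forever (A returns no value).
def Pre_cells_along_segment_py (a : Int × Int) (b : Int × Int) : Prop :=
  b.1 = a.1 ∨ b.2 = a.2 ∨ (b.1 - a.1).natAbs = (b.2 - a.2).natAbs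
instance (a : Int × Int) (b : Int × Int) : Decidable (Pre_cells_along_segment_py a b) := by unfold Pre_cells_along_segment_py; infer_instance

def pvWitness_cells_along_segment_py : (Int × Int) × (Int × Int) := ((0, 0), (3, 3))

def Spec_cells_along_segment_py (a : Int × Int) (b : Int × Int) (out : List (Int × Int)) : Prop := out = cells_along_segment_py_alt a b
instance (a : Int × Int) (b : Int × Int) (out : List (Int × Int)) : Decidable (Spec_cells_along_segment_py a b out) := by unfold Spec_cells_along_segment_py; infer_instance

-- ===== CLAIM (what is proved, stated in full; the proofs are below) =====
def Claim_equal_cells_along_segment_py : Prop := ∀ (a : Int × Int) (b : Int × Int), Dom_cells_along_segment_py a b → Pre_cells_along_segment_py a b → Spec_cells_along_segment_py a b (cells_along_segment_py a b)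

-- ===== LEMMAS AND PROOFS =====

-- the cell reached after i steps
def pvPos (a : Int × Int) (dx dy : Int) (i : Nat) : Int × Int :=
  (a.1 + (i : Int) * dx, a.2 + (i : Int) * dy)

-- loop invariant: starting at step i with fuel n - i, the loop emits cells i+1 … n
lemma pvLoopA_eq (a : Int × Int) (dx dy : Int) (b : Int × Int) (n : Nat)
    (hb : pvPos a dx dy n = b) (hne : ∀ j, j < n → pvPos a dx dy j ≠ b) :
    ∀ (m i : Nat), i + m = n → ∀ (cells : List (Int × Int)),
      pvLoopA dx dy b m (pvPos a dx dy i) cells =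
        cells ++ (List.range' (i + 1) (n - i)).map (pvPos a dx dy) := by
  intro m
  induction m with
  | zero =>
    intro i hi cells
    have hi' : i = n := by omega
    subst hi'
    simp [pvLoopA, hb]
  | succ f ih =>
    intro i hi cells
    have hlt : i < n := by omega
    rw [pvLoopA, if_neg (hne i hlt)]
    have hstep : ((pvPos a dx dy i).1 + dx, (pvPos a dx dy i).2 + dy) = pvPos a dx dy (i + 1) := by
      simp only [pvPos, Prod.mk.injEq]
      constructor <;> (push_cast; ring)
    rw [hstep, ih (i + 1) (by omega)]
    have hr : n - i = (n - (i + 1)) + 1 := by omega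
    rw [hr, List.range'_succ, List.map_cons]
    simp

theorem cells_along_segment_py_spec : Claim_equal_cells_along_segment_py := by
  intro a b _ hpre
  unfold Spec_cells_along_segment_py cells_along_segment_py cells_along_segment_py_alt
  set dx : Int := if b.1 = a.1 then 0 else if b.1 > a.1 then 1 else -1 with hdx
  set dy : Int := if b.2 = a.2 then 0 else if b.2 > a.2 then 1 else -1 with hdy
  set n : Nat := max (b.1 - a.1).natAbs (b.2 - a.2).natAbs with hn
  have hmul : (n : Int) * dx = b.1 - a.1 ∧ (n : Int) * dy = b.2 - a.2 := by
    rcases hpre with h | h | h <;> rw [hdx, hdy, hn] <;> split_ifs <;> omega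
  have hb : pvPos a dx dy n = b := by
    rw [Prod.ext_iff]
    simp only [pvPos]
    constructor
    · rw [hmul.1]; ring
    · rw [hmul.2]; ring
  have hne : ∀ j, j < n → pvPos a dx dy j ≠ b := by
    intro j hj heq
    rw [Prod.ext_iff] at heq
    simp only [pvPos] at heq
    obtain ⟨e1, e2⟩ := heq
    have hjn : (j : Int) ≠ (n : Int) := by exact_mod_cast Nat.ne_of_lt hj
    have d1 : dx = 0 := by
      by_contra hd
      exact hjn (mul_right_cancel₀ hd (by linarith [hmul.1]))
    have d2 : dy = 0 := by
      by_contra hd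
      exact hjn (mul_right_cancel₀ hd (by linarith [hmul.2]))
    have hb1 : b.1 = a.1 := by have := hmul.1; rw [d1] at this; linarith
    have hb2 : b.2 = a.2 := by have := hmul.2; rw [d2] at this; linarith
    omega
  have hmain := pvLoopA_eq a dx dy b n hb hne n 0 (by omega) [a]
  have h0 : pvPos a dx dy 0 = a := by simp [pvPos]
  rw [h0] at hmain
  rw [hmain]
  simp only [List.range_eq_range', List.range'_succ, List.map_cons, Nat.sub_zero, Nat.zero_add]
  show _ = pvPos a dx dy 0 :: List.map (pvPos a dx dy) (List.range' 1 n)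
  simp [h0]
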